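-- pv_equiv track=rewrite | github.com/SuminBae97/Problem_Solving | BOJ/test.py | third_person
-- ===== SOURCE A (Python) =====
-- def third_person(n):
--     answers = [0 for _ in range(10000)]
--
--     for i in range(0,10000,10):
--         answers[i] = 3
--         answers[i+1] =3
--
--     for i in range(2,10000,10):
--         answers[i] =1
--         answers[i+1]=1
--
--     for i in range(4,10000,10):
--         answers[i]=2
--         answers[i+1]=2
--
--     for i in range(6,10000,10):
--         answers[i]=4
--         answers[i+1]=4
--
--     for i in range(8,10000,10):
--         answers[i]=5
--         answers[i+1]=5
--
--
--     return answers[:n]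
-- ===== SOURCE B (Python) =====
-- def third_person(n):
--     P = [3, 3, 1, 1, 2, 2, 4, 4, 5, 5]
--     return (P * 1000)[:n]
-- ===== Notes on version B (the rewrite author's own statement) =====
-- stated objective: simpler
-- what changed: Replaces the five index-stepping fill loops over a preallocated zero table with a single list replication of the period pattern, followed by the same slice.
import Mathlib
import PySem

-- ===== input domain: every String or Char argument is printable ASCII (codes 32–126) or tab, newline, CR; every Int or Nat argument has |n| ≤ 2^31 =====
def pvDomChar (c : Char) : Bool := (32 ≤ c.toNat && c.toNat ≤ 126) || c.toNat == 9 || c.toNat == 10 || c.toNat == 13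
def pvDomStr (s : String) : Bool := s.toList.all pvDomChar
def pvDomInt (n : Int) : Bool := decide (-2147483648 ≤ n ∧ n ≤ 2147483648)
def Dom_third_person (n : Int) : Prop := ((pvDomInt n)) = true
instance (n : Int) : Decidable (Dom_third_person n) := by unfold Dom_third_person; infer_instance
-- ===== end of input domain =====

-- B replaces A's five index-stepping fill loops over a 10000-element zero array by one
-- replication of the 10-element period pattern, then the same slice (objective: simpler).

-- ===== PORT A =====
-- one 'for i in range(lo,hi,10): answers[i]=v; answers[i+1]=v' loop of A
def pvFill (lo hi v : Int) (xs : List Int) : List Int :=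
  (PySem.List.pyRange lo hi 10).foldl
    (fun acc i => (acc.set i.toNat v).set (i + 1).toNat v) xs

def third_person (n : Int) : List Int :=
  PySem.List.slice
    (pvFill 8 10000 5 (pvFill 6 10000 4 (pvFill 4 10000 2 (pvFill 2 10000 1 (pvFill 0 10000 3
      ((PySem.List.pyRange 0 10000 1).map (fun _ => (0 : Int))))))))
    none (some n)

-- ===== PORT B =====
def third_person_alt (n : Int) : List Int :=
  PySem.List.slice ((List.replicate 1000 ([3, 3, 1, 1, 2, 2, 4, 4, 5, 5] : List Int)).flatten)
    none (some n)

-- ===== PRECONDITION & SPEC =====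
def Spec_third_person (n : Int) (out : List Int) : Prop := out = third_person_alt n
instance (n : Int) (out : List Int) : Decidable (Spec_third_person n out) := by unfold Spec_third_person; infer_instance

-- ===== CLAIM (what is proved, stated in full; the proofs are below) =====
def Claim_equal_third_person : Prop := ∀ (n : Int), Dom_third_person n → Spec_third_person n (third_person n)

-- ===== LEMMAS AND PROOFS =====

-- the period pattern
def pvP : List Int := [3, 3, 1, 1, 2, 2, 4, 4, 5, 5]

-- the step-10 range as a mapped List.range (for 0 ≤ j < 10)
theorem pvRange10 (j : Int) (hj0 : 0 ≤ j) (hj : j < 10) (k : Nat) :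
    PySem.List.pyRange j (10 * (k : Int)) 10
      = (List.range k).map (fun (m : Nat) => j + 10 * (m : Int)) := by
  rw [PySem.List.pyRange_of_pos _ _ (by norm_num)]
  have harg : (if j < 10 * (k : Int) then ((10 * (k : Int) - j + 10 - 1) / 10).toNat else 0) = k := by
    by_cases h : j < 10 * (k : Int)
    · rw [if_pos h]; omega
    · rw [if_neg h]; omega
  rw [harg]

theorem pvFill_zero (j v : Int) (hj0 : 0 ≤ j) (xs : List Int) :
    pvFill j 0 v xs = xs := by
  unfold pvFill
  rw [PySem.List.pyRange_of_pos _ _ (by norm_num), if_neg (by omega)]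
  rfl

-- a fill fold preserves the length
theorem pvFoldLen (v : Int) (is : List Int) (xs : List Int) :
    (is.foldl (fun acc i => (acc.set i.toNat v).set (i + 1).toNat v) xs).length = xs.length := by
  induction is generalizing xs with
  | nil => rfl
  | cons i is ih => simp [List.foldl_cons, ih]

-- a fill fold whose indices stay inside xs acts only on xs
theorem pvFoldSplit (v : Int) (is : List Int) (xs ys : List Int)
    (h : ∀ i ∈ is, 0 ≤ i ∧ i.toNat + 1 < xs.length) :
    is.foldl (fun acc i => (acc.set i.toNat v).set (i + 1).toNat v) (xs ++ ys)
      = (is.foldl (fun acc i => (acc.set i.toNat v).set (i + 1).toNat v) xs) ++ ys := by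
  induction is generalizing xs with
  | nil => rfl
  | cons i is ih =>
    obtain ⟨h0, h1⟩ := h i (by simp)
    have hs1 : (xs.set i.toNat v).length = xs.length := List.length_set ..
    simp only [List.foldl_cons]
    rw [List.set_append, if_pos (by omega), List.set_append, if_pos (by rw [hs1]; omega)]
    rw [ih]
    intro x hx
    have hb := h x (by simp [hx])
    have hs2 : ((xs.set i.toNat v).set (i + 1).toNat v).length = xs.length := by
      rw [List.length_set, hs1]
    omega

-- one fill loop over 10*(k+1) slots on a split state: the prefix gets the k-block fill,
-- the 10-slot suffix gets its two cells set
theorem pvFillSucc (j v : Int) (hj0 : 0 ≤ j) (hj : j ≤ 8) (k : Nat) (xs ys : List Int)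
    (hx : xs.length = 10 * k) :
    pvFill j (10 * ((k : Int) + 1)) v (xs ++ ys)
      = pvFill j (10 * (k : Int)) v xs ++ ((ys.set j.toNat v).set (j.toNat + 1) v) := by
  unfold pvFill
  have hcast : (10 * ((k : Int) + 1)) = 10 * ((k + 1 : Nat) : Int) := by push_cast; ring
  rw [hcast, pvRange10 j hj0 (by omega) (k + 1), pvRange10 j hj0 (by omega) k,
    List.range_succ, List.map_append, List.foldl_append]
  have hb : ∀ i ∈ (List.range k).map (fun (m : Nat) => j + 10 * (m : Int)),
      0 ≤ i ∧ i.toNat + 1 < xs.length := by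
    intro i hi
    simp only [List.mem_map, List.mem_range] at hi
    obtain ⟨m, hm, rfl⟩ := hi
    omega
  rw [pvFoldSplit v _ xs ys hb]
  simp only [List.map_cons, List.map_nil, List.foldl_cons, List.foldl_nil]
  have hlen : (List.foldl (fun acc i => (acc.set i.toNat v).set (i + 1).toNat v)
      xs ((List.range k).map (fun (m : Nat) => j + 10 * (m : Int)))).length = 10 * k := by
    rw [pvFoldLen]; exact hx
  have h1 : (j + 10 * (k : Int)).toNat = 10 * k + j.toNat := by omega
  have h2 : (j + 10 * (k : Int) + 1).toNat = 10 * k + (j.toNat + 1) := by omega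
  have hlen2 : ((List.foldl (fun acc i => (acc.set i.toNat v).set (i + 1).toNat v)
      xs ((List.range k).map (fun (m : Nat) => j + 10 * (m : Int)))) ++ ys.set j.toNat v).length
      = 10 * k + (ys.set j.toNat v).length := by
    rw [List.length_append, hlen]
  rw [List.set_append, if_neg (by omega), h1, hlen, Nat.add_sub_cancel_left]
  rw [List.set_append, if_neg (by rw [hlen]; omega), h2, hlen, Nat.add_sub_cancel_left]

-- the five fill loops over 10*k slots on k zero-blocks produce k pattern blocks
theorem pvTable (k : Nat) :
    pvFill 8 (10 * (k : Int)) 5 (pvFill 6 (10 * (k : Int)) 4 (pvFill 4 (10 * (k : Int)) 2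
      (pvFill 2 (10 * (k : Int)) 1 (pvFill 0 (10 * (k : Int)) 3
        (List.replicate (10 * k) (0 : Int))))))
      = (List.replicate k pvP).flatten := by
  induction k with
  | zero =>
    have h0 : (10 * ((0 : Nat) : Int)) = 0 := by norm_num
    rw [h0, pvFill_zero 8 5 (by norm_num), pvFill_zero 6 4 (by norm_num),
      pvFill_zero 4 2 (by norm_num), pvFill_zero 2 1 (by norm_num), pvFill_zero 0 3 (by norm_num)]
    rfl
  | succ k ih =>
    have hrep : List.replicate (10 * (k + 1)) (0 : Int)
        = List.replicate (10 * k) (0 : Int) ++ List.replicate 10 (0 : Int) := by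
      have h10 : 10 * (k + 1) = 10 * k + 10 := by ring
      rw [h10, ← List.replicate_add]
    have hcast : ((k + 1 : Nat) : Int) = (k : Int) + 1 := by push_cast; ring
    rw [hcast, hrep]
    rw [pvFillSucc 0 3 (by norm_num) (by norm_num) k _ _ (by simp)]
    rw [pvFillSucc 2 1 (by norm_num) (by norm_num) k _ _ (by unfold pvFill; rw [pvFoldLen]; simp)]
    rw [pvFillSucc 4 2 (by norm_num) (by norm_num) k _ _
      (by unfold pvFill; rw [pvFoldLen, pvFoldLen]; simp)]
    rw [pvFillSucc 6 4 (by norm_num) (by norm_num) k _ _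
      (by unfold pvFill; rw [pvFoldLen, pvFoldLen, pvFoldLen]; simp)]
    rw [pvFillSucc 8 5 (by norm_num) (by norm_num) k _ _
      (by unfold pvFill; rw [pvFoldLen, pvFoldLen, pvFoldLen, pvFoldLen]; simp)]
    rw [ih]
    have hsucc : List.replicate (k + 1) pvP = List.replicate k pvP ++ [pvP] :=
      List.replicate_succ' ..
    rw [hsucc, List.flatten_append]
    rfl

-- ===== VERDICT (by name: the statement is the Claim_ definition above) =====
theorem third_person_spec : Claim_equal_third_person := by
  intro n _
  unfold Spec_third_person third_person third_person_alt
  have hzero : (PySem.List.pyRange 0 10000 1).map (fun _ => (0 : Int))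
      = List.replicate (10 * 1000) (0 : Int) := by
    rw [List.map_const', PySem.List.length_pyRange_one]
    rfl
  have h10000 : (10000 : Int) = 10 * ((1000 : Nat) : Int) := by norm_num
  rw [hzero, h10000, pvTable 1000]
  rfl
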